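-- pv_equiv track=rewrite | github.com/twoong01/my_study | 프로그래머스/unrated/148653. 마법의 엘리베이터/마법의 엘리베이터.py | solution
-- ===== SOURCE A (Python) =====
-- def solution(storey):
--     answer = 0
--
--     while storey:
--         r = storey % 10
--         if r > 5:
--             answer += (10 - r)
--             storey += 10
--         elif r < 5:
--             answer += r
--         else:
--             if (storey // 10) % 10 > 4:
--                 storey += 10
--             answer += r
--         storey //= 10
--
--     return answer
-- ===== SOURCE B (Python) =====
-- def solution(storey):
--     # recursive: for each digit, try both rounding down (pay r) and rounding
--     # up (pay 10-r, carry 1), and take the cheaper total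
--     def f(n):
--         if n < 10:
--             return min(n, 11 - n)
--         r = n % 10
--         return min(r + f(n // 10), (10 - r) + f(n // 10 + 1))
--     return f(storey)
-- ===== Notes on version B (the rewrite author's own statement) =====
-- stated objective: alternative
-- what changed: replaces A's greedy digit-by-digit loop with its next-digit look-ahead tie-break by a recursion that tries both rounding choices per digit and takes the min
-- outside the precondition, e.g. on solution(-1): A returns 1, B returns -1
import Mathlib
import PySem

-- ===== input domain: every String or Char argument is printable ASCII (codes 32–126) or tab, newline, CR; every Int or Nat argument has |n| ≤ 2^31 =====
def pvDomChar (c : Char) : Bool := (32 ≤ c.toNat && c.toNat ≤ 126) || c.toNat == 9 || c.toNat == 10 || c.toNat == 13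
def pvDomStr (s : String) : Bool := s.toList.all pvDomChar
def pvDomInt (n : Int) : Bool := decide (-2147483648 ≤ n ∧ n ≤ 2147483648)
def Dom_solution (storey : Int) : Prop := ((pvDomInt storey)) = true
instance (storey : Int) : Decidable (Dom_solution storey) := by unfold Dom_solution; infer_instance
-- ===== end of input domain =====

-- B replaces A's greedy digit loop (with its next-digit look-ahead tie-break) by a
-- recursion trying both rounding choices per digit and taking the min (objective: alternative).

-- ===== PORT A =====
-- while loop ported with fuel; storey.natAbs + 1 steps suffice because each
-- iteration strictly decreases storey.toNat for the admitted (nonnegative) inputs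
def solutionLoop : Nat → Int → Int → Int
  | 0, _, answer => answer
  | fuel + 1, storey, answer =>
    if storey = 0 then answer
    else
      let r := PySem.Int.mod storey 10
      if r > 5 then
        solutionLoop fuel (PySem.Int.floordiv (storey + 10) 10) (answer + (10 - r))
      else if r < 5 then
        solutionLoop fuel (PySem.Int.floordiv storey 10) (answer + r)
      else if PySem.Int.mod (PySem.Int.floordiv storey 10) 10 > 4 then
        solutionLoop fuel (PySem.Int.floordiv (storey + 10) 10) (answer + r)
      else
        solutionLoop fuel (PySem.Int.floordiv storey 10) (answer + r)

def solution (storey : Int) : Int := solutionLoop (storey.natAbs + 1) storey 0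

-- ===== PORT B =====
-- Source B's recursion ported with fuel as the totality guard; storey.natAbs + 1
-- levels suffice because the recursion argument strictly decreases .toNat
def faltF : Nat → Int → Int
  | 0, _ => 0
  | fuel + 1, n =>
    if n < 10 then min n (11 - n)
    else
      let r := PySem.Int.mod n 10
      min (r + faltF fuel (PySem.Int.floordiv n 10))
          ((10 - r) + faltF fuel (PySem.Int.floordiv n 10 + 1))

def solution_alt (storey : Int) : Int := faltF (storey.natAbs + 1) storey

-- ===== PRECONDITION & SPEC =====
-- Pre_ restricts to nonnegative storeys, the problem's natural domain (elevator
-- floors); on negative inputs A's returned values are accidental artefacts of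
-- %/ // on negatives and B returns the input itself.
def Pre_solution (storey : Int) : Prop := 0 ≤ storey
instance (storey : Int) : Decidable (Pre_solution storey) := by unfold Pre_solution; infer_instance
def pvWitness_solution : Int := (2554)
def Spec_solution (storey : Int) (out : Int) : Prop := out = solution_alt storey
instance (storey : Int) (out : Int) : Decidable (Spec_solution storey out) := by unfold Spec_solution; infer_instance

-- ===== CLAIM (what is proved, stated in full; the proofs are below) =====
def Claim_equal_solution : Prop := ∀ (storey : Int), Dom_solution storey → Pre_solution storey → Spec_solution storey (solution storey)

-- ===== LEMMAS AND PROOFS =====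

-- the fuel argument is irrelevant once it exceeds the recursion depth
lemma faltF_irrel : ∀ (k f1 f2 : Nat) (n : Int), 0 ≤ n → n.toNat < k →
    n.toNat < f1 → n.toNat < f2 → faltF f1 n = faltF f2 n := by
  intro k
  induction k with
  | zero => intro f1 f2 n _ hk; omega
  | succ k ih =>
    intro f1 f2 n hn hk h1 h2
    obtain ⟨f1, rfl⟩ : ∃ g, f1 = g + 1 := ⟨f1 - 1, by omega⟩
    obtain ⟨f2, rfl⟩ : ∃ g, f2 = g + 1 := ⟨f2 - 1, by omega⟩
    by_cases h : n < 10
    · simp [faltF, h]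
    · simp only [faltF, if_neg h]
      rw [PySem.Int.mod_eq_emod_of_pos (by omega : (0:Int) < 10),
          PySem.Int.floordiv_eq_ediv_of_pos (by omega : (0:Int) < 10)]
      rw [ih f1 f2 (n / 10) (by omega) (by omega) (by omega) (by omega),
          ih f1 f2 (n / 10 + 1) (by omega) (by omega) (by omega) (by omega)]

-- canonical fuel for the proofs
def faltN (n : Int) : Int := faltF (n.toNat + 1) n

lemma faltN_eq_faltF (fuel : Nat) (n : Int) (hn : 0 ≤ n) (hf : n.toNat < fuel) :
    faltF fuel n = faltN n := by
  exact faltF_irrel (n.toNat + 1) fuel (n.toNat + 1) n hn (by omega) hf (by omega)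

lemma falt_base (n : Int) (h : n < 10) : faltN n = min n (11 - n) := by
  unfold faltN
  simp [faltF, h]

lemma falt_eq (n : Int) (h : 10 ≤ n) :
    faltN n = min (n % 10 + faltN (n / 10)) (10 - n % 10 + faltN (n / 10 + 1)) := by
  conv_lhs => unfold faltN
  simp only [faltF, if_neg (by omega : ¬ n < 10)]
  rw [PySem.Int.mod_eq_emod_of_pos (by omega : (0:Int) < 10),
      PySem.Int.floordiv_eq_ediv_of_pos (by omega : (0:Int) < 10)]
  rw [faltN_eq_faltF n.toNat (n / 10) (by omega) (by omega),
      faltN_eq_faltF n.toNat (n / 10 + 1) (by omega) (by omega)]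
-- adjacent values of falt differ by at most 1, and the direction of the step
-- is decided by the last digit (≥ 5 ⇒ going up is at least as good)
lemma falt_step : ∀ (k : Nat) (n : Int), 0 ≤ n → n.toNat < k →
    faltN (n + 1) ≤ faltN n + 1 ∧ faltN n ≤ faltN (n + 1) + 1 ∧
    (5 ≤ n % 10 → faltN (n + 1) ≤ faltN n) ∧ (n % 10 ≤ 4 → faltN n ≤ faltN (n + 1)) := by
  intro k
  induction k with
  | zero => intro n _ hk; omega
  | succ k ih =>
    intro n hn hk
    by_cases h8 : n ≤ 8
    · rw [falt_base n (by omega), falt_base (n + 1) (by omega)]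
      omega
    · by_cases h9 : n = 9
      · subst h9
        have e10 : (9:Int) + 1 = 10 := by norm_num
        rw [e10, falt_base 9 (by norm_num), falt_eq 10 (by norm_num)]
        norm_num
        rw [falt_base 1 (by norm_num), falt_base 2 (by norm_num)]
        omega
      · -- n ≥ 10
        have h10 : 10 ≤ n := by omega
        have hq : (0:Int) ≤ n / 10 := by omega
        have hqlt : (n / 10).toNat < k := by omega
        have hq1lt : (n / 10 + 1).toNat < k := by omega
        have Hq := ih (n / 10) hq hqlt
        by_cases hr : n % 10 ≤ 8
        · have e1 : (n + 1) / 10 = n / 10 := by omega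
          have e2 : (n + 1) % 10 = n % 10 + 1 := by omega
          rw [falt_eq n h10, falt_eq (n + 1) (by omega), e1, e2]
          omega
        · -- last digit 9
          have e1 : (n + 1) / 10 = n / 10 + 1 := by omega
          have e2 : (n + 1) % 10 = 0 := by omega
          have Hq1 := ih (n / 10 + 1) (by omega) hq1lt
          rw [falt_eq n h10, falt_eq (n + 1) (by omega), e1, e2]
          omega

lemma falt_zero : faltN 0 = 0 := by rw [falt_base 0 (by norm_num)]; norm_num

lemma loop_eq : ∀ (k fuel : Nat) (n a : Int), 0 ≤ n → n.toNat < k → n.toNat < fuel →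
    solutionLoop fuel n a = a + faltN n := by
  intro k
  induction k with
  | zero => intro fuel n a _ hk; omega
  | succ k ih =>
    intro fuel n a hn hk hf
    obtain ⟨fuel, rfl⟩ : ∃ f, fuel = f + 1 := ⟨fuel - 1, by omega⟩
    by_cases h0 : n = 0
    · subst h0
      simp [solutionLoop, falt_zero]
    · have hpos : 0 < n := by omega
      rw [solutionLoop]
      simp only [if_neg h0]
      rw [PySem.Int.mod_eq_emod_of_pos (by omega : (0:Int) < 10)]
      rw [PySem.Int.floordiv_eq_ediv_of_pos (by omega : (0:Int) < 10),
          PySem.Int.floordiv_eq_ediv_of_pos (by omega : (0:Int) < 10),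
          PySem.Int.mod_eq_emod_of_pos (by omega : (0:Int) < 10)]
      have hq : (0:Int) ≤ n / 10 := by omega
      have Hq := falt_step (k := n.toNat) (n / 10) hq (by omega)
      by_cases hgt : n % 10 > 5
      · rw [if_pos hgt]
        have e : (n + 10) / 10 = n / 10 + 1 := by omega
        rw [e, ih fuel (n / 10 + 1) _ (by omega) (by omega) (by omega)]
        have hv : faltN n = 10 - n % 10 + faltN (n / 10 + 1) := by
          by_cases hlt : n < 10
          · rw [falt_base n hlt]
            have e1 : n / 10 = 0 := by omega
            have e01 : (0:Int) + 1 = 1 := by norm_num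
            rw [e1, e01, falt_base 1 (by norm_num)]
            omega
          · rw [falt_eq n (by omega)]
            omega
        omega
      · rw [if_neg hgt]
        by_cases hlt5 : n % 10 < 5
        · rw [if_pos hlt5, ih fuel (n / 10) _ (by omega) (by omega) (by omega)]
          have hv : faltN n = n % 10 + faltN (n / 10) := by
            by_cases hlt : n < 10
            · rw [falt_base n hlt]
              have e1 : n / 10 = 0 := by omega
              rw [e1, falt_zero]
              omega
            · rw [falt_eq n (by omega)]
              omega
          omega
        · rw [if_neg hlt5]
          have hr5 : n % 10 = 5 := by omega
          by_cases htie : n / 10 % 10 > 4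
          · rw [if_pos htie]
            have e : (n + 10) / 10 = n / 10 + 1 := by omega
            rw [e, ih fuel (n / 10 + 1) _ (by omega) (by omega) (by omega)]
            have hv : faltN n = 5 + faltN (n / 10 + 1) := by
              have h10 : 10 ≤ n := by omega
              rw [falt_eq n h10]
              omega
            omega
          · rw [if_neg htie]
            rw [ih fuel (n / 10) _ (by omega) (by omega) (by omega)]
            have hv : faltN n = 5 + faltN (n / 10) := by
              by_cases hlt : n < 10
              · have e5 : n = 5 := by omega
                subst e5
                rw [falt_base 5 (by norm_num)]
                norm_num [falt_zero]
              · rw [falt_eq n (by omega)]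
                omega
            omega

-- ===== VERDICT (by name: the statement is the Claim_ definition above) =====
theorem solution_spec : Claim_equal_solution := by
  intro storey _ hpre
  unfold Spec_solution solution solution_alt
  rw [loop_eq (storey.toNat + 1) (storey.natAbs + 1) storey 0 hpre (by omega) (by omega)]
  rw [faltN_eq_faltF (storey.natAbs + 1) storey hpre (by omega)]
  omega
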